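-- pv_equiv track=rewrite | github.com/Iliev-S/crystallite_analysis | Plane_fitting_functions.py | layer_split
-- ===== SOURCE A (Python) =====
-- def layer_split(increment, start, end):
--     result_list = []
--
--     for j in range(increment):
--         empty_list = []
--         for i in range(start + j, end+1, increment):
--             empty_list.append(i)
--         result_list.append(empty_list)
--     return result_list
-- ===== SOURCE B (Python) =====
-- def layer_split(increment, start, end):
--     buckets = [[] for _ in range(increment)]
--     if increment > 0:
--         for i in range(start, end + 1):
--             buckets[(i - start) % increment].append(i)
--     return buckets
-- ===== Notes on version B (the rewrite author's own statement) =====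
-- stated objective: faster
-- what changed: Replaces the nested per-offset strided loops with a single flat pass over [start, end] that scatters each index into a pre-created modular bucket.
import Mathlib
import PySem

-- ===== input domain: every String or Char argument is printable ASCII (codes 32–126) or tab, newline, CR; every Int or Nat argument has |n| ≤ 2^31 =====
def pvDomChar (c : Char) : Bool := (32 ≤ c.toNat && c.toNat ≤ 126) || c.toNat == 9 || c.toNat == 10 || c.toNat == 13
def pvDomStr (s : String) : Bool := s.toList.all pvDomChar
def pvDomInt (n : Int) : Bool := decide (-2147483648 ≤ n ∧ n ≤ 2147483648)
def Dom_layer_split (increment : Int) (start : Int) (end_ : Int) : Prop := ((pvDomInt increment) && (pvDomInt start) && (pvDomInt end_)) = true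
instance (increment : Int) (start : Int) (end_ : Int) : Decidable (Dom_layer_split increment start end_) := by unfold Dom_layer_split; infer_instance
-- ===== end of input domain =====

-- B scatters each index of [start, end] into its modular bucket in one flat pass instead of
-- A's nested per-offset strided loops (objective: faster by a constant factor, as measured).

-- ===== PORT A =====
-- outer loop over range(increment); inner loop appends each i of the strided range
def layer_split (increment : Int) (start : Int) (end_ : Int) : List (List Int) :=
  (PySem.List.pyRange 0 increment 1).foldl
    (fun result_list j =>
      result_list ++
        [(PySem.List.pyRange (start + j) (end_ + 1) increment).foldl
          (fun empty_list i => empty_list ++ [i]) []])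
    []

-- ===== PORT B =====
-- buckets = [[] for _ in range(increment)]; then (if increment > 0) one pass over
-- range(start, end+1) appending i to buckets[(i - start) % increment]
def layer_split_alt (increment : Int) (start : Int) (end_ : Int) : List (List Int) :=
  let buckets := (PySem.List.pyRange 0 increment 1).map (fun _ => ([] : List Int))
  if 0 < increment then
    (PySem.List.pyRange start (end_ + 1) 1).foldl
      (fun bs i => bs.modify (PySem.Int.mod (i - start) increment).toNat (fun b => b ++ [i]))
      buckets
  else buckets

-- ===== PRECONDITION & SPEC =====
def Spec_layer_split (increment : Int) (start : Int) (end_ : Int) (out : List (List Int)) : Prop := out = layer_split_alt increment start end_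
instance (increment : Int) (start : Int) (end_ : Int) (out : List (List Int)) : Decidable (Spec_layer_split increment start end_ out) := by unfold Spec_layer_split; infer_instance

-- ===== CLAIM (what is proved, stated in full; the proofs are below) =====
def Claim_equal_layer_split : Prop := ∀ (increment : Int) (start : Int) (end_ : Int), Dom_layer_split increment start end_ → Spec_layer_split increment start end_ (layer_split increment start end_)

-- ===== LEMMAS AND PROOFS =====

-- folding "append a singleton" is mapping
theorem foldl_concat_eq_append_map {α β : Type} (l : List α) (f : α → β) (acc : List β) :
    l.foldl (fun a x => a ++ [f x]) acc = acc ++ l.map f := by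
  induction l generalizing acc with
  | nil => simp
  | cons x xs ih => simp [List.foldl_cons, ih]

-- A computes the list of strided ranges
theorem layer_split_eq_map (increment start end_ : Int) :
    layer_split increment start end_ =
      (PySem.List.pyRange 0 increment 1).map
        (fun j => PySem.List.pyRange (start + j) (end_ + 1) increment) := by
  unfold layer_split
  rw [foldl_concat_eq_append_map]
  simp only [List.nil_append]
  refine List.map_congr_left (fun j _ => ?_)
  rw [foldl_concat_eq_append_map, List.map_id']
  simp

-- an empty strided range
theorem stride_nil {s c b : Int} (hs : 0 < s) (h : b ≤ c) :
    PySem.List.pyRange c b s = [] := by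
  rw [PySem.List.pyRange_of_pos _ _ hs, if_neg (by omega)]
  simp

-- peeling the first element off a strided range
theorem stride_cons {s c b : Int} (hs : 0 < s) (hcb : c < b) :
    PySem.List.pyRange c b s = c :: PySem.List.pyRange (c + s) b s := by
  rw [PySem.List.pyRange_of_pos _ _ hs, PySem.List.pyRange_of_pos _ _ hs, if_pos hcb]
  have h1 : b - c + s - 1 = (b - c - 1) + 1 * s := by ring
  by_cases h2 : c + s < b
  · rw [if_pos h2]
    have hq0 : (0:Int) ≤ (b - c - 1) / s := Int.ediv_nonneg (by omega) (by omega)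
    have hN : ((b - c + s - 1) / s).toNat = ((b - (c + s) + s - 1) / s).toNat + 1 := by
      have h3 : b - (c + s) + s - 1 = b - c - 1 := by ring
      rw [h1, h3, Int.add_mul_ediv_right _ _ (by omega : s ≠ 0)]
      omega
    rw [hN, List.range_succ_eq_map, List.map_cons, List.map_map]
    refine congrArg₂ _ (by ring) (List.map_congr_left (fun k _ => ?_))
    simp only [Function.comp_apply]
    push_cast
    ring
  · rw [if_neg h2]
    have hz : (b - c - 1) / s = 0 := Int.ediv_eq_zero_of_lt (by omega) (by omega)
    have hN : ((b - c + s - 1) / s).toNat = 1 := by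
      rw [h1, Int.add_mul_ediv_right _ _ (by omega : s ≠ 0), hz]
      omega
    rw [hN]
    simp

-- appending the top end to a strided range
theorem stride_succ_right {s : Int} (hs : 0 < s) (c m : Int) :
    PySem.List.pyRange c (m + 1) s =
      PySem.List.pyRange c m s ++ (if c ≤ m ∧ s ∣ (m - c) then [m] else []) := by
  by_cases hcm : c ≤ m
  · induction hn : (m - c).toNat using Nat.strong_induction_on generalizing c with
    | _ n ih =>
      by_cases hrec : c + s ≤ m
      · rw [stride_cons hs (by omega : c < m + 1), stride_cons hs (by omega : c < m)]
        rw [ih ((m - (c + s)).toNat) (by omega) (c + s) (by omega) rfl]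
        have hcond : (c + s ≤ m ∧ s ∣ (m - (c + s))) ↔ (c ≤ m ∧ s ∣ (m - c)) := by
          constructor
          · rintro ⟨h1, q, hq⟩
            exact ⟨by omega, q + 1, by rw [mul_add, mul_one]; omega⟩
          · rintro ⟨h1, q, hq⟩
            exact ⟨hrec, q - 1, by rw [mul_sub, mul_one]; omega⟩
        by_cases hd : c ≤ m ∧ s ∣ (m - c)
        · rw [if_pos (hcond.mpr hd), if_pos hd]
          simp
        · rw [if_neg (fun h => hd (hcond.mp h)), if_neg hd]
          simp
      · -- m - c < s
        by_cases heq : c = m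
        · subst heq
          rw [stride_nil hs (le_refl c), stride_cons hs (by omega : c < c + 1),
            stride_nil hs (by omega : c + 1 ≤ c + s), if_pos ⟨le_refl c, by simp⟩]
          simp
        · have hlt : c < m := by omega
          rw [stride_cons hs (by omega : c < m + 1), stride_cons hs hlt,
            stride_nil hs (by omega : m + 1 ≤ c + s), stride_nil hs (by omega : m ≤ c + s)]
          rw [if_neg ?_]
          · simp
          · rintro ⟨-, q, hq⟩
            by_cases hq0 : q ≤ 0
            · nlinarith
            · have : 1 ≤ q := by omega
              nlinarith
  · rw [stride_nil hs (by omega : m + 1 ≤ c), stride_nil hs (by omega : m ≤ c),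
      if_neg (by omega)]
    simp

-- one scatter pass over start..start+n builds exactly the strided ranges up to start+n
theorem scatter_main (increment start : Int) (hinc : 0 < increment) (n : Nat) :
    (PySem.List.pyRange start (start + n) 1).foldl
      (fun bs i => bs.modify (PySem.Int.mod (i - start) increment).toNat (fun b => b ++ [i]))
      ((PySem.List.pyRange 0 increment 1).map (fun _ => ([] : List Int)))
    = (PySem.List.pyRange 0 increment 1).map
        (fun j => PySem.List.pyRange (start + j) (start + n) increment) := by
  induction n with
  | zero =>
    rw [PySem.List.pyRange_one_eq_nil (show start + ((0:Nat):Int) ≤ start by simp)]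
    simp only [List.foldl_nil]
    refine List.map_congr_left (fun j hj => ?_)
    have := (PySem.List.mem_pyRange_one).mp hj
    exact (stride_nil hinc (by omega)).symm
  | succ n ih =>
    have hcast : (start + (↑(n + 1) : Int)) = (start + n) + 1 := by push_cast; ring
    rw [hcast, PySem.List.pyRange_one_succ_right (by omega), List.foldl_append, ih]
    simp only [List.foldl_cons, List.foldl_nil]
    have hmodeq : PySem.Int.mod (start + (n:Int) - start) increment = (n:Int) % increment := by
      rw [PySem.Int.mod_eq_emod_of_pos hinc]; congr 1; ring
    rw [hmodeq]
    have hm0 : 0 ≤ (n:Int) % increment := Int.emod_nonneg _ (by omega)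
    have hmlt : (n:Int) % increment < increment := Int.emod_lt_of_pos _ hinc
    apply List.ext_getElem
    · simp [List.length_modify]
    · intro i h1 h2
      rw [List.getElem_modify]
      have hlen : i < (PySem.List.pyRange 0 increment 1).length := by
        simpa using h2
      rw [List.getElem_map, List.getElem_map, PySem.List.getElem_pyRange_one 0 increment i hlen]
      have hibound : (i:Int) < increment := by
        have := PySem.List.length_pyRange_one 0 increment
        omega
      rw [stride_succ_right hinc (start + (0 + (i:Int))) (start + n)]
      by_cases hik : ((n:Int) % increment).toNat = i
      · rw [if_pos hik]
        have hji : (0 + (i:Int)) = (n:Int) % increment := by omega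
        have hdvd : increment ∣ (start + (n:Int) - (start + (0 + (i:Int)))) := by
          refine ⟨(n:Int) / increment, ?_⟩
          have h := Int.mul_ediv_add_emod (n:Int) increment
          have h2 : start + (n:Int) - (start + (0 + (i:Int))) = (n:Int) - (n:Int) % increment := by
            omega
          linarith
        have hle : start + (0 + (i:Int)) ≤ start + (n:Int) := by
          rcases lt_or_ge (n:Int) increment with h | h
          · rw [hji, Int.emod_eq_of_lt (by positivity) h]
          · linarith [hmlt, hji]
        rw [if_pos ⟨hle, hdvd⟩]
      · rw [if_neg hik]
        rcases Classical.em (start + (0 + (i:Int)) ≤ start + (n:Int) ∧ increment ∣ (start + (n:Int) - (start + (0 + (i:Int))))) with hcond | hcond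
        · exfalso
          obtain ⟨hle, q, hq⟩ := hcond
          have : (n:Int) % increment = (i:Int) := by
            have h1' : (n:Int) = (i:Int) + increment * q := by omega
            rw [h1', Int.add_mul_emod_self_left, Int.emod_eq_of_lt (by omega) hibound]
          omega
        · rw [if_neg hcond]
          simp

-- ===== VERDICT (by name: the statement is the Claim_ definition above) =====
theorem layer_split_spec : Claim_equal_layer_split := by
  intro increment start end_ _
  unfold Spec_layer_split
  rw [layer_split_eq_map]
  unfold layer_split_alt
  by_cases hinc : 0 < increment
  · rw [if_pos hinc]
    by_cases hse : start ≤ end_ + 1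
    · have hn : end_ + 1 = start + ((end_ + 1 - start).toNat : Int) := by omega
      rw [hn, scatter_main increment start hinc]
    · rw [PySem.List.pyRange_one_eq_nil (show end_ + 1 ≤ start by omega)]
      simp only [List.foldl_nil]
      refine List.map_congr_left (fun j hj => ?_)
      have := (PySem.List.mem_pyRange_one).mp hj
      exact stride_nil hinc (by omega)
  · rw [if_neg hinc]
    rw [PySem.List.pyRange_one_eq_nil (show increment ≤ (0:Int) by omega)]
    simp
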